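-- pv_equiv track=rewrite | github.com/Veselin-Stoilov/softuni-projects-python-advanced | modules_lab/custom_modules_ves/triangle_ves.py | create_triangle
-- ===== SOURCE A (Python) =====
-- def create_line(n: int):
--     line = []
--     for el in range(1, n + 1):
--         line.append(el)
--     return line
--
-- def create_triangle(n: int):
--     matrix = []
--     for i in range(1, n + 1):
--         row = create_line(i)
--         matrix.append(row)
--     for i in range(n - 1, 0, -1):
--         row = create_line(i)
--         matrix.append(row)
--     return matrix
-- ===== SOURCE B (Python) =====
-- def create_triangle(n: int):
--     # Single pass over all 2n-1 row positions; row k's length is the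
--     # closed form n - |n - k| (rises to n then falls), so no second
--     # count-down stage and no mirroring of built rows is needed.
--     return [list(range(1, n - abs(n - k) + 1)) for k in range(1, 2 * n)]
-- ===== Notes on version B (the rewrite author's own statement) =====
-- stated objective: alternative
-- what changed: Replaces A's two staged loops (build ascending rows 1..n, then rebuild descending rows n-1..1) with one single pass over all 2n-1 row positions using the closed-form row length n - |n - k|.
import Mathlib
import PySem

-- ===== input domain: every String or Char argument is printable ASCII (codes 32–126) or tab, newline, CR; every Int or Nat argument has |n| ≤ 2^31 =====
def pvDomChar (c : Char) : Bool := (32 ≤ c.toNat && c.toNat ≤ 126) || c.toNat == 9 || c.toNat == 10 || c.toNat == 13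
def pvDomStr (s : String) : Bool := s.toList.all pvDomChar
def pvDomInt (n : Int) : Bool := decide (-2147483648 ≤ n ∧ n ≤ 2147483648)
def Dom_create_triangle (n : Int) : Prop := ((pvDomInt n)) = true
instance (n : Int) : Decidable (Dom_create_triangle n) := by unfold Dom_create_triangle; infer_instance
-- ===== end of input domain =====

-- B is a single pass over all 2n-1 row positions using the closed-form row length n - |n - k|; alternative decomposition, same cost.

-- ===== PORT A =====
def create_line (n : Int) : List Int :=
  (PySem.List.pyRange 1 (n + 1) 1).foldl (fun line el => line ++ [el]) []

def create_triangle (n : Int) : List (List Int) :=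
  let m1 := (PySem.List.pyRange 1 (n + 1) 1).foldl (fun m i => m ++ [create_line i]) []
  (PySem.List.pyRange (n - 1) 0 (-1)).foldl (fun m i => m ++ [create_line i]) m1

-- ===== PORT B =====
def create_triangle_alt (n : Int) : List (List Int) :=
  (PySem.List.pyRange 1 (2 * n) 1).map (fun k => PySem.List.pyRange 1 (n - |n - k| + 1) 1)

-- ===== PRECONDITION & SPEC =====
def Spec_create_triangle (n : Int) (out : List (List Int)) : Prop := out = create_triangle_alt n
instance (n : Int) (out : List (List Int)) : Decidable (Spec_create_triangle n out) := by unfold Spec_create_triangle; infer_instance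

-- ===== CLAIM (what is proved, stated in full; the proofs are below) =====
def Claim_equal_create_triangle : Prop := ∀ (n : Int), Dom_create_triangle n → Spec_create_triangle n (create_triangle n)

-- ===== LEMMAS AND PROOFS =====

theorem create_line_eq (n : Int) : create_line n = PySem.List.pyRange 1 (n + 1) 1 := by
  rw [create_line, PySem.List.foldl_append_singleton]; rfl

-- the list of row lengths of B equals the concatenation of A's two index ranges
theorem lengths_eq (n : Int) (h : 1 ≤ n) :
    (PySem.List.pyRange 1 (2 * n) 1).map (fun k => n - |n - k|)
      = PySem.List.pyRange 1 (n + 1) 1 ++ PySem.List.pyRange (n - 1) 0 (-1) := by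
  rw [PySem.List.pyRange_one_append 1 (n + 1) (2 * n) (by omega) (by omega), List.map_append]
  congr 1
  · have h1 : ∀ k ∈ PySem.List.pyRange 1 (n + 1) 1, n - |n - k| = k := by
      intro k hk
      rw [PySem.List.mem_pyRange_one] at hk
      have : |n - k| = n - k := abs_of_nonneg (by omega)
      omega
    rw [List.map_congr_left h1, List.map_id']
  · rw [PySem.List.pyRange_one, PySem.List.pyRange_neg_one, List.map_map]
    have he : (2 * n - (n + 1)).toNat = (n - 1 - 0).toNat := by omega
    rw [he]
    exact List.map_congr_left (fun k _ => by
      simp only [Function.comp_apply]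
      have : |n - (n + 1 + (k : Int))| = 1 + k := by
        rw [abs_of_nonpos (by omega)]; ring
      omega)

-- ===== VERDICT (by name: the statement is the Claim_ definition above) =====
theorem create_triangle_spec : Claim_equal_create_triangle := by
  intro n _
  show create_triangle n = create_triangle_alt n
  simp only [create_triangle, create_triangle_alt,
    PySem.List.foldl_append_singleton_eq_map, create_line_eq, List.nil_append]
  by_cases h : n ≤ 0
  · rw [PySem.List.pyRange_one_eq_nil (by omega : n + 1 ≤ 1),
        PySem.List.pyRange_neg_one_eq_nil (by omega : n - 1 ≤ 0),
        PySem.List.pyRange_one_eq_nil (by omega : 2 * n ≤ 1)]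
    simp
  · rw [← List.map_append, ← lengths_eq n (by omega), List.map_map]
    rfl
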